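-- pv_equiv track=rewrite | github.com/hayesmit/20190107-Python-Fullstack-Day | 1 Python/solutions/lab13-rotn.py | encode13
-- ===== SOURCE A (Python) =====
-- alphabet = 'abcdefghijklmnopqrstuvwxyz'
--
-- rot13 	 = 'nopqrstuvwxyzabcdefghijklm'
--
-- def encode13(message):
-- 	"""
-- 	encodes message with ROT-13
-- 	:message: str
-- 	returns message rotated forwards by 13
--
-- 	>>> encode13('abc def123')
-- 	'nop qrs123'
-- 	"""
-- 	output = ''
-- 	for char in message:
-- 		if char in alphabet:
-- 			idx = alphabet.index(char)
-- 			encoded_char = rot13[idx]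
-- 			output += encoded_char
-- 		else:
-- 			output += char
-- 		# # if you used dictionaries
-- 		# output += rot13.get(char, char)
-- 	return output
-- ===== SOURCE B (Python) =====
-- def encode13(message):
--     """ROT-13 via arithmetic on character codes instead of a table lookup."""
--     return ''.join(
--         chr((ord(c) - 97 + 13) % 26 + 97) if 'a' <= c <= 'z' else c
--         for c in message)
-- ===== Notes on version B (the rewrite author's own statement) =====
-- stated objective: idiomatic
-- what changed: Replaces the alphabet/rot13 lookup tables and linear .index scan with direct modular arithmetic on character codes, joining a generator instead of repeated string concatenation.
import Mathlib
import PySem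

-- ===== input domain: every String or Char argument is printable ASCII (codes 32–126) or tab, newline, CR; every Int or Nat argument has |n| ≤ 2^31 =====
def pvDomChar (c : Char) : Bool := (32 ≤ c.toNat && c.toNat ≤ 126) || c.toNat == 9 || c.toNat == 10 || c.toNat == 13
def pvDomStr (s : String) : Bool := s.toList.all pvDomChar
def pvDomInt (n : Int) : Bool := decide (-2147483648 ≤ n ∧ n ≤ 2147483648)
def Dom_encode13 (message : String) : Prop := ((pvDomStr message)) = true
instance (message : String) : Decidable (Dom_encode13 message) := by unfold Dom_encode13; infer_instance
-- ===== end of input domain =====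

-- B replaces A's alphabet/rot13 lookup tables and linear index scan with direct modular
-- arithmetic on character codes (idiomatic); the two agree on every input.

-- ===== PORT A =====
-- module constants `alphabet` and `rot13`
def pvAlphabet : List Char := ['a','b','c','d','e','f','g','h','i','j','k','l','m','n','o','p','q','r','s','t','u','v','w','x','y','z']
def pvRot13 : List Char := ['n','o','p','q','r','s','t','u','v','w','x','y','z','a','b','c','d','e','f','g','h','i','j','k','l','m']

-- body of A's loop: 'char in alphabet' then 'rot13[alphabet.index(char)]' else 'char'.
-- The `none` arm of the match is unreachable (in the branch the char was found, so the
-- index is a valid position of rot13); Python raises nowhere here.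
def pvEncAChar (c : Char) : Char :=
  if PySem.Chars.isIn [c] pvAlphabet then
    match PySem.List.pyGet? pvRot13 (PySem.Chars.find pvAlphabet [c]) with
    | some e => e
    | none => c
  else c

def encode13 (message : String) : String :=
  String.ofList (message.toList.foldl (fun out c => out ++ [pvEncAChar c]) [])

-- ===== PORT B =====
-- chr((ord(c) - 97 + 13) % 26 + 97) if 'a' <= c <= 'z' else c
def pvRotChar (c : Char) : Char :=
  if 'a' ≤ c ∧ c ≤ 'z' then Char.ofNat ((c.toNat - 97 + 13) % 26 + 97) else c

def encode13_alt (message : String) : String :=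
  String.ofList (message.toList.map pvRotChar)

-- ===== PRECONDITION & SPEC =====
def Spec_encode13 (message : String) (out : String) : Prop := out = encode13_alt message
instance (message : String) (out : String) : Decidable (Spec_encode13 message out) := by unfold Spec_encode13; infer_instance

-- ===== CLAIM (what is proved, stated in full; the proofs are below) =====
def Claim_equal_encode13 : Prop := ∀ (message : String), Dom_encode13 message → Spec_encode13 message (encode13 message)

-- ===== LEMMAS AND PROOFS =====
theorem pv_mem_alpha_of_range (c : Char) (h : 97 ≤ c.toNat) (h2 : c.toNat ≤ 122) : c ∈ pvAlphabet := by
  rw [← Char.ofNat_toNat c]; interval_cases c.toNat <;> decide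

theorem pvEncAChar_eq_rotChar (c : Char) : pvEncAChar c = pvRotChar c := by
  by_cases hm : c ∈ pvAlphabet
  · fin_cases hm <;> decide
  · have h1 : PySem.Chars.isIn [c] pvAlphabet = false := by
      rw [PySem.Chars.isIn_eq_false_iff]
      intro hinf; exact hm (hinf.sublist.subset (List.mem_singleton_self c))
    have h2 : ¬ ('a' ≤ c ∧ c ≤ 'z') := by
      rintro ⟨ha, hz⟩
      simp [Char.le_def, UInt32.le_iff_toNat_le] at ha hz
      exact hm (pv_mem_alpha_of_range c ha hz)
    rw [pvEncAChar, pvRotChar, h1, if_neg h2]; rfl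

theorem pv_fold_eq (l : List Char) :
    l.foldl (fun out c => out ++ [pvEncAChar c]) [] = l.map pvRotChar := by
  have h := PySem.List.foldl_append_singleton_eq_map (f := pvEncAChar) (l := l) (acc := [])
  exact h.trans (List.map_congr_left (fun c _ => pvEncAChar_eq_rotChar c))

-- ===== VERDICT (by name: the statement is the Claim_ definition above) =====
theorem encode13_spec : Claim_equal_encode13 := by
  intro message _
  unfold Spec_encode13 encode13 encode13_alt
  rw [pv_fold_eq]
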